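-- pv_equiv track=rewrite | github.com/Dav0ud/imagegridviewer | scripts/generate_bom.py | select_permissive_license
-- ===== SOURCE A (Python) =====
-- LICENSE_PERMISSIVENESS_ORDER = [
--     'Unlicense',
--     'MIT',
--     'BSD',
--     'ISC',
--     'Apache',
--     'MPL',  # Mozilla Public License
--     'LGPL', # Lesser General Public License
--     'GPL',  # General Public License (as a fallback if nothing else matches)
-- ]
--
-- def select_permissive_license(license_string: str) -> str:
--     """
--     Selects the most permissive license from a string containing multiple licenses
--     (e.g., "LGPL-3.0-only OR GPL-2.0-only").
--     """
--     # If it's not a multi-license string, just clean it up and return.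
--     if ' OR ' not in license_string:
--         return license_string.replace('-only', '')
--
--     licenses = [lic.strip() for lic in license_string.split(' OR ')]
--
--     for permissive_type in LICENSE_PERMISSIVENESS_ORDER:
--         for license_option in licenses:
--             if permissive_type.lower() in license_option.lower():
--                 # Clean up common suffixes like '-only' and return the match.
--                 return license_option.replace('-only', '')
--
--     # Fallback to the first license in the list if no match from our order.
--     return licenses[0].replace('-only', '')
-- ===== SOURCE B (Python) =====
-- LICENSE_PERMISSIVENESS_ORDER = [
--     'Unlicense',
--     'MIT',
--     'BSD',
--     'ISC',
--     'Apache',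
--     'MPL',
--     'LGPL',
--     'GPL',
-- ]
--
--
-- def select_permissive_license(license_string: str) -> str:
--     """Rank-based rewrite: compute each license's permissiveness rank once,
--     then keep the first license with the smallest rank in one pass."""
--     if ' OR ' not in license_string:
--         return license_string.replace('-only', '')
--
--     licenses = [lic.strip() for lic in license_string.split(' OR ')]
--
--     def rank(lic):
--         low = lic.lower()
--         i = 0
--         for t in LICENSE_PERMISSIVENESS_ORDER:
--             if t.lower() in low:
--                 return i
--             i += 1
--         return i  # == len(LICENSE_PERMISSIVENESS_ORDER): no match
--
--     best = licenses[0]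
--     best_rank = rank(best)
--     for lic in licenses[1:]:
--         r = rank(lic)
--         if r < best_rank:
--             best, best_rank = lic, r
--     return best.replace('-only', '')
-- ===== Notes on version B (the rewrite author's own statement) =====
-- stated objective: alternative
-- what changed: Replaces A's nested early-return scan (order x licenses) by computing a permissiveness rank per license and a single strict-min pass over the licenses.
import Mathlib
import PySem

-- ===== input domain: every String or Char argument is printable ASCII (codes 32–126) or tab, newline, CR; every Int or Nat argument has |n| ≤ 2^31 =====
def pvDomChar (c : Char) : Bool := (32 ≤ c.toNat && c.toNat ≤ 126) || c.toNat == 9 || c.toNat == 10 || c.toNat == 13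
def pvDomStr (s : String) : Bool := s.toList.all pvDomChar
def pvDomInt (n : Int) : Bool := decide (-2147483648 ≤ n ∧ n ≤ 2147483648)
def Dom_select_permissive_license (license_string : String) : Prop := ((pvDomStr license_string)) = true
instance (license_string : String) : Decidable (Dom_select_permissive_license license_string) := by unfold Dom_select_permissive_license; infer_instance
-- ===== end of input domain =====

-- B replaces A's nested early-return scan by a per-license rank and one strict-min pass (alternative decomposition, same cost).

def pvOrder : List String :=
  ["Unlicense", "MIT", "BSD", "ISC", "Apache", "MPL", "LGPL", "GPL"]

-- ===== PORT A =====
-- inner 'for license_option in licenses' with early return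
def pvInnerA (t : String) : List String → Option String
  | [] => none
  | l :: rest =>
    if PySem.Str.isIn (PySem.Str.lower t) (PySem.Str.lower l) then some l
    else pvInnerA t rest

-- outer 'for permissive_type in LICENSE_PERMISSIVENESS_ORDER'
def pvOuterA (licenses : List String) : List String → Option String
  | [] => none
  | t :: rest =>
    match pvInnerA t licenses with
    | some l => some l
    | none => pvOuterA licenses rest

def select_permissive_license (license_string : String) : String :=
  if PySem.Str.isIn " OR " license_string then
    let licenses := ((PySem.Str.split? license_string " OR ").getD []).map PySem.Str.strip  -- sep ≠ '', split? is always some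
    match pvOuterA licenses pvOrder with
    | some l => PySem.Str.replace l "-only" ""
    | none => PySem.Str.replace (licenses.headD "") "-only" ""  -- licenses[0]; split output is never empty
  else
    PySem.Str.replace license_string "-only" ""

-- ===== PORT B =====
-- rank's loop over LICENSE_PERMISSIVENESS_ORDER with counter i
def pvRankGo (low : String) (i : Nat) : List String → Nat
  | [] => i
  | t :: rest =>
    if PySem.Str.isIn (PySem.Str.lower t) low then i
    else pvRankGo low (i + 1) rest

def pvRank (ord : List String) (lic : String) : Nat :=
  pvRankGo (PySem.Str.lower lic) 0 ord

-- body of 'for lic in licenses[1:]'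
def pvStep (ord : List String) (p : String × Nat) (lic : String) : String × Nat :=
  let r := pvRank ord lic
  if r < p.2 then (lic, r) else p

def select_permissive_license_alt (license_string : String) : String :=
  if PySem.Str.isIn " OR " license_string then
    let licenses := ((PySem.Str.split? license_string " OR ").getD []).map PySem.Str.strip  -- sep ≠ '', split? is always some
    let b0 := licenses.headD ""  -- licenses[0]; split output is never empty
    let best := ((PySem.List.slice licenses (some 1) none).foldl (pvStep pvOrder) (b0, pvRank pvOrder b0)).1
    PySem.Str.replace best "-only" ""
  else
    PySem.Str.replace license_string "-only" ""

-- ===== PRECONDITION & SPEC =====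
def Spec_select_permissive_license (license_string : String) (out : String) : Prop := out = select_permissive_license_alt license_string
instance (license_string : String) (out : String) : Decidable (Spec_select_permissive_license license_string out) := by unfold Spec_select_permissive_license; infer_instance

-- ===== CLAIM (what is proved, stated in full; the proofs are below) =====
def Claim_equal_select_permissive_license : Prop := ∀ (license_string : String), Dom_select_permissive_license license_string → Spec_select_permissive_license license_string (select_permissive_license license_string)

-- ===== LEMMAS AND PROOFS =====

lemma pvInnerA_eq_find? (t : String) : ∀ ls : List String,
    pvInnerA t ls = ls.find? (fun l => PySem.Str.isIn (PySem.Str.lower t) (PySem.Str.lower l))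
  | [] => rfl
  | l :: rest => by
    rw [pvInnerA, List.find?]
    cases h : PySem.Str.isIn (PySem.Str.lower t) (PySem.Str.lower l)
    · simp only [Bool.false_eq_true, if_false]
      exact pvInnerA_eq_find? t rest
    · simp only [if_true]

lemma pvOuterA_nil : ∀ ord : List String, pvOuterA [] ord = none
  | [] => rfl
  | t :: rest => by simp [pvOuterA, pvInnerA, pvOuterA_nil rest]

lemma pvRankGo_shift (low : String) : ∀ (ord : List String) (i : Nat),
    pvRankGo low i ord = i + pvRankGo low 0 ord
  | [], i => by simp [pvRankGo]
  | t :: rest, i => by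
    simp only [pvRankGo]
    split_ifs with h
    · rfl
    · rw [pvRankGo_shift low rest (i + 1), pvRankGo_shift low rest 1]
      omega

lemma pvRank_cons (t : String) (ord : List String) (lic : String) :
    pvRank (t :: ord) lic =
      if PySem.Str.isIn (PySem.Str.lower t) (PySem.Str.lower lic) then 0
      else pvRank ord lic + 1 := by
  simp only [pvRank, pvRankGo]
  split_ifs with h
  · rfl
  · rw [pvRankGo_shift (PySem.Str.lower lic) ord 1]; omega

lemma pv_fold_noimp (ord : List String) : ∀ (xs : List String) (b : String) (r : Nat),
    (∀ y ∈ xs, ¬ pvRank ord y < r) → xs.foldl (pvStep ord) (b, r) = (b, r)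
  | [], b, r, _ => rfl
  | y :: ys, b, r, h => by
    have hy : ¬ pvRank ord y < r := h y (by simp)
    simp only [List.foldl_cons, pvStep, if_neg hy]
    exact pv_fold_noimp ord ys b r (fun z hz => h z (by simp [hz]))

lemma pv_fold_zero (ord : List String) : ∀ (xs : List String) (b l : String) (r : Nat),
    0 < r → xs.find? (fun x => pvRank ord x == 0) = some l →
    xs.foldl (pvStep ord) (b, r) = (l, 0)
  | [], b, l, r, _, hf => by simp at hf
  | y :: ys, b, l, r, hr, hf => by
    by_cases hy : pvRank ord y = 0
    · have hyb : (pvRank ord y == 0) = true := by simp [hy]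
      have hl : l = y := by
        simp only [List.find?, hyb] at hf
        exact (Option.some_inj.mp hf).symm
      subst hl
      simp only [List.foldl_cons, pvStep, hy, if_pos hr]
      exact pv_fold_noimp ord ys l 0 (fun z _ => by omega)
    · have hyb : (pvRank ord y == 0) = false := by simp [hy]
      have hf' : ys.find? (fun x => pvRank ord x == 0) = some l := by
        simpa only [List.find?, hyb] using hf
      simp only [List.foldl_cons, pvStep]
      split_ifs with hlt
      · exact pv_fold_zero ord ys y l (pvRank ord y) (by omega) hf'
      · exact pv_fold_zero ord ys b l r hr hf'

lemma pv_fold_succ (t : String) (ord : List String) : ∀ (xs : List String) (b : String) (r : Nat),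
    (∀ x ∈ xs, pvRank (t :: ord) x = pvRank ord x + 1) →
    xs.foldl (pvStep (t :: ord)) (b, r + 1)
      = ((xs.foldl (pvStep ord) (b, r)).1, (xs.foldl (pvStep ord) (b, r)).2 + 1)
  | [], b, r, _ => rfl
  | y :: ys, b, r, h => by
    have hy : pvRank (t :: ord) y = pvRank ord y + 1 := h y (by simp)
    have hrest : ∀ x ∈ ys, pvRank (t :: ord) x = pvRank ord x + 1 :=
      fun x hx => h x (by simp [hx])
    simp only [List.foldl_cons, pvStep, hy]
    by_cases hlt : pvRank ord y < r
    · rw [if_pos (by omega), if_pos hlt]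
      exact pv_fold_succ t ord ys y (pvRank ord y) hrest
    · rw [if_neg (by omega), if_neg hlt]
      exact pv_fold_succ t ord ys b r hrest

lemma pv_find?_congr (p q : String → Bool) : ∀ xs : List String,
    (∀ x ∈ xs, p x = q x) → xs.find? p = xs.find? q
  | [], _ => rfl
  | y :: ys, h => by
    have hy : p y = q y := h y (by simp)
    simp only [List.find?, hy]
    split
    · rfl
    · exact pv_find?_congr p q ys (fun x hx => h x (by simp [hx]))

theorem pv_main : ∀ (ord licenses : List String),
    (match pvOuterA licenses ord with
     | some l => l
     | none => licenses.headD "")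
    = (licenses.tail.foldl (pvStep ord) (licenses.headD "", pvRank ord (licenses.headD ""))).1 := by
  intro ord
  induction ord with
  | nil =>
    intro licenses
    have h0 : ∀ y : String, pvRank [] y = 0 := fun _ => rfl
    simp only [pvOuterA, h0]
    rw [pv_fold_noimp [] licenses.tail (licenses.headD "") 0 (fun y _ => by omega)]
  | cons t ord' ih =>
    intro licenses
    cases hf : licenses.find? (fun l => PySem.Str.isIn (PySem.Str.lower t) (PySem.Str.lower l)) with
    | some l =>
      have hA : pvOuterA licenses (t :: ord') = some l := by
        rw [pvOuterA, pvInnerA_eq_find?, hf]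
      rw [hA]
      cases licenses with
      | nil => simp at hf
      | cons b0 rest =>
        simp only [List.headD_cons, List.tail_cons]
        by_cases hb : PySem.Str.isIn (PySem.Str.lower t) (PySem.Str.lower b0) = true
        · have hl : l = b0 := by
            rw [List.find?] at hf
            simp only [hb] at hf
            exact (Option.some_inj.mp hf).symm
          have hr0 : pvRank (t :: ord') b0 = 0 := by rw [pvRank_cons, if_pos hb]
          rw [hr0, pv_fold_noimp (t :: ord') rest b0 0 (fun y _ => by omega), hl]
        · have hb' : PySem.Str.isIn (PySem.Str.lower t) (PySem.Str.lower b0) = false := by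
            cases h' : PySem.Str.isIn (PySem.Str.lower t) (PySem.Str.lower b0)
            · rfl
            · exact absurd h' hb
          have hf' : rest.find? (fun l => PySem.Str.isIn (PySem.Str.lower t) (PySem.Str.lower l)) = some l := by
            rw [List.find?] at hf
            simpa only [hb'] using hf
          have hfz : rest.find? (fun x => pvRank (t :: ord') x == 0) = some l := by
            rw [pv_find?_congr (fun x => pvRank (t :: ord') x == 0)
              (fun l => PySem.Str.isIn (PySem.Str.lower t) (PySem.Str.lower l)) rest
              (fun x _ => by
                show (pvRank (t :: ord') x == 0) = PySem.Str.isIn (PySem.Str.lower t) (PySem.Str.lower x)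
                rw [pvRank_cons]
                cases h : PySem.Str.isIn (PySem.Str.lower t) (PySem.Str.lower x)
                · simp only [Bool.false_eq_true, if_false]
                  simp
                · simp)]
            exact hf'
          have hrb : pvRank (t :: ord') b0 = pvRank ord' b0 + 1 := by
            rw [pvRank_cons, if_neg hb]
          rw [hrb, pv_fold_zero (t :: ord') rest b0 l (pvRank ord' b0 + 1) (by omega) hfz]
    | none =>
      have hnone : ∀ x ∈ licenses, PySem.Str.isIn (PySem.Str.lower t) (PySem.Str.lower x) = false := by
        intro x hx
        have h1 := List.find?_eq_none.mp hf x hx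
        simp only [Bool.not_eq_true] at h1
        exact h1
      have hA : pvOuterA licenses (t :: ord') = pvOuterA licenses ord' := by
        rw [pvOuterA, pvInnerA_eq_find?, hf]
      rw [hA]
      cases licenses with
      | nil =>
        rw [pvOuterA_nil]
        rfl
      | cons b0 rest =>
        rw [ih (b0 :: rest)]
        simp only [List.headD_cons, List.tail_cons]
        have hrb : pvRank (t :: ord') b0 = pvRank ord' b0 + 1 := by
          rw [pvRank_cons, if_neg (ne_true_of_eq_false (hnone b0 (by simp)))]
        rw [hrb, pv_fold_succ t ord' rest b0 (pvRank ord' b0)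
          (fun x hx => by rw [pvRank_cons, if_neg (ne_true_of_eq_false (hnone x (by simp [hx])))])]

-- ===== VERDICT (by name: the statement is the Claim_ definition above) =====
theorem select_permissive_license_spec : Claim_equal_select_permissive_license := by
  intro s _
  unfold Spec_select_permissive_license select_permissive_license select_permissive_license_alt
  by_cases h : PySem.Str.isIn " OR " s = true
  · rw [if_pos h, if_pos h]
    simp only [PySem.List.slice_from_one]
    have hmain := pv_main pvOrder (((PySem.Str.split? s " OR ").getD []).map PySem.Str.strip)
    cases hm : pvOuterA (((PySem.Str.split? s " OR ").getD []).map PySem.Str.strip) pvOrder <;>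
      simp only [hm] at hmain ⊢ <;>
      exact congrArg (fun x => PySem.Str.replace x "-only" "") hmain
  · rw [if_neg h, if_neg h]
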